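-- pv_equiv track=rewrite | github.com/harrylyx/newt | src/newt/reporting/builders/sheet_registry.py | filter_output_sheet_keys
-- ===== SOURCE A (Python) =====
-- from typing import Dict, List, Optional, Sequence
--
-- def filter_output_sheet_keys(
--     requested_keys: Sequence[str],
--     availability: Dict[str, bool],
-- ) -> List[str]:
--     """Filter output keys by optional sheet availability."""
--     output: List[str] = []
--     for key in requested_keys:
--         if key in availability and not availability[key]:
--             continue
--         if key not in output:
--             output.append(key)
--     return output
-- ===== SOURCE B (Python) =====
-- from typing import Dict, List, Sequence
--
--
-- def filter_output_sheet_keys(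
--     requested_keys: Sequence[str],
--     availability: Dict[str, bool],
-- ) -> List[str]:
--     """Filter output keys by optional sheet availability.
--
--     Built back-to-front: walk the keys in reverse; each kept key is prepended
--     to the partial result after purging its duplicates from it, so the first
--     occurrence (in original order) wins without any membership test.
--     """
--     output: List[str] = []
--     for key in reversed(requested_keys):
--         if availability.get(key, True):
--             output = [key] + [k for k in output if k != key]
--     return output
-- ===== Notes on version B (the rewrite author's own statement) =====
-- stated objective: alternative
-- what changed: Replaces the forward loop with an output-membership test by a back-to-front construction: iterate the keys in reverse and, for each key whose availability is not falsy, prepend it after purging its duplicates from the partial result, so the first occurrence wins with no membership branch.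
import Mathlib
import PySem

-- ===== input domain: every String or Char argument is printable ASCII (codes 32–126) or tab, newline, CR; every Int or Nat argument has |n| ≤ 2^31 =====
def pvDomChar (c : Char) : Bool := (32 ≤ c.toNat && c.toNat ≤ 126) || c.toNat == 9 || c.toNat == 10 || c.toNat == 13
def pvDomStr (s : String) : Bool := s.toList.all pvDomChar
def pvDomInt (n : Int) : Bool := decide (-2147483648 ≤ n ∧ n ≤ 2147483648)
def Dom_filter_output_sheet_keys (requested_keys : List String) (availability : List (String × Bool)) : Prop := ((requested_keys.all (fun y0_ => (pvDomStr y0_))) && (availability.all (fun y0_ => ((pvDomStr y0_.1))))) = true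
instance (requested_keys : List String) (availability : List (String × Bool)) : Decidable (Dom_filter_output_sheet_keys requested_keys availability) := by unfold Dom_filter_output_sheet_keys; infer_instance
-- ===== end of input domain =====

-- B builds the result back-to-front (reverse walk, prepend a kept key and purge its duplicates from the partial result) instead of A's forward loop with an output-membership test; alternative decomposition, no speed claim.
-- ===== PORT A =====
-- literal port: forward loop over requested_keys with an output accumulator;
-- 'key in availability' / 'availability[key]' = first-match association-list lookup (List.lookup)
def filter_output_sheet_keys (requested_keys : List String) (availability : List (String × Bool)) : List String :=
  requested_keys.foldl (fun output key =>
    match List.lookup key availability with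
    | some v =>
        if !v then output
        else if output.contains key then output else output ++ [key]
    | none => if output.contains key then output else output ++ [key]) []

-- ===== PORT B =====
-- Source B: for key in reversed(requested_keys): if availability.get(key, True): output = [key] + [k for k in output if k != key]
def filter_output_sheet_keys_alt (requested_keys : List String) (availability : List (String × Bool)) : List String :=
  requested_keys.reverse.foldl (fun output key =>
    if (List.lookup key availability).getD true then
      key :: output.filter (fun k => k != key)
    else output) []

-- ===== PRECONDITION & SPEC =====
def Spec_filter_output_sheet_keys (requested_keys : List String) (availability : List (String × Bool)) (out : List String) : Prop := out = filter_output_sheet_keys_alt requested_keys availability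
instance (requested_keys : List String) (availability : List (String × Bool)) (out : List String) : Decidable (Spec_filter_output_sheet_keys requested_keys availability out) := by unfold Spec_filter_output_sheet_keys; infer_instance

-- ===== CLAIM (what is proved, stated in full; the proofs are below) =====
def Claim_equal_filter_output_sheet_keys : Prop := ∀ (requested_keys : List String) (availability : List (String × Bool)), Dom_filter_output_sheet_keys requested_keys availability → Spec_filter_output_sheet_keys requested_keys availability (filter_output_sheet_keys requested_keys availability)

-- ===== LEMMAS AND PROOFS =====

-- B's reverse-foldl is the structural foldr of the same step function.
theorem altB_eq_foldr (requested_keys : List String) (availability : List (String × Bool)) :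
    filter_output_sheet_keys_alt requested_keys availability
      = requested_keys.foldr (fun key output =>
          if (List.lookup key availability).getD true then
            key :: output.filter (fun k => k != key)
          else output) [] := by
  unfold filter_output_sheet_keys_alt
  rw [List.foldl_reverse]

-- Invariant: A's fold from any accumulator 'out' appends exactly B's foldr result
-- with the keys already present in 'out' filtered away.
theorem foldA_inv (availability : List (String × Bool)) :
    ∀ (l : List String) (out : List String),
      l.foldl (fun output key =>
        match List.lookup key availability with
        | some v =>
            if !v then output
            else if output.contains key then output else output ++ [key]
        | none => if output.contains key then output else output ++ [key]) out
      = out ++ (l.foldr (fun key output =>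
          if (List.lookup key availability).getD true then
            key :: output.filter (fun k => k != key)
          else output) []).filter (fun x => !out.contains x) := by
  intro l
  induction l with
  | nil => intro out; simp
  | cons k t ih =>
      intro out
      rw [List.foldl_cons, List.foldr_cons]
      have hsplit : (match List.lookup k availability with
          | some v =>
              if !v then out
              else if out.contains k then out else out ++ [k]
          | none => if out.contains k then out else out ++ [k])
          = if (List.lookup k availability).getD true then
              (if out.contains k then out else out ++ [k]) else out := by
        cases h : List.lookup k availability with
        | none => simp
        | some v => cases v <;> simp
      rw [hsplit]
      by_cases hp : (List.lookup k availability).getD true = true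
      · rw [if_pos hp, if_pos hp]
        by_cases hc : out.contains k = true
        · rw [if_pos hc, ih]
          congr 1
          rw [List.filter_cons]
          simp only [hc, Bool.not_true, if_false]
          rw [List.filter_filter]
          apply List.filter_congr
          intro x _
          by_cases hxk : x = k
          · subst hxk; simp only [bne_self_eq_false, Bool.not_true, Bool.false_and]
            simp only [Bool.not_eq_true', List.contains_eq_mem, decide_eq_false_iff_not]
            simp at hc
            simp [hc]
          · simp [hxk]
        · rw [if_neg hc, ih, List.append_assoc]
          congr 1
          rw [List.filter_cons]
          have hck : (!out.contains k) = true := by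
            cases h : out.contains k
            · rfl
            · exact absurd h hc
          simp only [hck, if_true]
          simp only [List.singleton_append, List.cons.injEq, true_and]
          rw [List.filter_filter]
          apply List.filter_congr
          intro x _
          by_cases hxk : x = k
          · subst hxk; simp
          · simp [hxk]
      · rw [if_neg hp, if_neg hp, ih]

-- ===== VERDICT (by name: the statement is the Claim_ definition above) =====
theorem filter_output_sheet_keys_spec : Claim_equal_filter_output_sheet_keys := by
  intro requested_keys availability _
  unfold Spec_filter_output_sheet_keys
  rw [altB_eq_foldr]
  unfold filter_output_sheet_keys
  rw [foldA_inv]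
  simp
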